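-- pv_equiv track=rewrite | github.com/Ashfudie/Antivirus-free-Trojan-horse | jump_node.py | parse_command_message
-- ===== SOURCE A (Python) =====
-- def parse_command_message(message):
--     """解析上位IP发送的命令消息"""
--     message_parts = message.split(';')
--     target_ip = None
--     command = None
--
--     for part in message_parts:
--         if part.startswith('ip='):
--             target_ip = part[3:]
--         elif part.startswith('cmd='):
--             command = part[4:]
--
--     return target_ip, command
-- ===== SOURCE B (Python) =====
-- def parse_command_message(message):
--     """解析上位IP发送的命令消息 (parse-all-then-lookup: build a key->value table, then look up)"""
--     table = {}
--     for part in message.split(';'):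
--         eq = part.find('=')
--         if eq != -1:
--             table[part[:eq]] = part[eq + 1:]
--     return table.get('ip'), table.get('cmd')
-- ===== Notes on version B (the rewrite author's own statement) =====
-- stated objective: idiomatic
-- what changed: Instead of A's two prefix-guarded accumulator variables updated by branch-scanning each part, B parses every part at its first equals sign into a generic key-to-value dict and afterwards looks the ip and cmd keys up with dict.get.
import Mathlib
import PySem

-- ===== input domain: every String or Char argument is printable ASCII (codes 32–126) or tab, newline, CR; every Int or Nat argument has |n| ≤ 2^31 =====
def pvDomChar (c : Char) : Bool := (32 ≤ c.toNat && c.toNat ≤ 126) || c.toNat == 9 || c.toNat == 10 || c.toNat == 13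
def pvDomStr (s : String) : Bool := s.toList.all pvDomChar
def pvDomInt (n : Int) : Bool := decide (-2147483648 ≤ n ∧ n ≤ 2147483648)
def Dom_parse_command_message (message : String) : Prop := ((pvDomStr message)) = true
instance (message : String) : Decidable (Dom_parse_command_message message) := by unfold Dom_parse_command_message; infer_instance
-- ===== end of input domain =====

-- B replaces A's two prefix-guarded accumulator variables by a generic key→value table built
-- with find('=') and looked up afterwards (objective: idiomatic; same return value everywhere).

-- ===== PORT A =====
-- loop body of A: two accumulators updated on the 'ip='/'cmd=' prefixes
def pvAStep (st : Option String × Option String) (part : String) : Option String × Option String :=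
  if PySem.Str.startswith part "ip=" then (some (PySem.Str.slice part (some 3) none), st.2)
  else if PySem.Str.startswith part "cmd=" then (st.1, some (PySem.Str.slice part (some 4) none))
  else st

def parse_command_message (message : String) : Option String × Option String :=
  let message_parts := (PySem.Str.split? message ";").getD []
  message_parts.foldl pvAStep (none, none)

-- ===== PORT B =====
-- loop body of B: store part[:eq] ↦ part[eq+1:] whenever '=' occurs (eq = part.find('='))
def pvBStep (d : PySem.Dict String String) (part : String) : PySem.Dict String String :=
  let eq := PySem.Str.find part "="
  if eq != -1 then d.insert (PySem.Str.slice part none (some eq)) (PySem.Str.slice part (some (eq + 1)) none)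
  else d

def parse_command_message_alt (message : String) : Option String × Option String :=
  let table := ((PySem.Str.split? message ";").getD []).foldl pvBStep PySem.Dict.empty
  (table.get? "ip", table.get? "cmd")

-- ===== PRECONDITION & SPEC =====
def Spec_parse_command_message (message : String) (out : Option String × Option String) : Prop := out = parse_command_message_alt message
instance (message : String) (out : Option String × Option String) : Decidable (Spec_parse_command_message message out) := by unfold Spec_parse_command_message; infer_instance

-- ===== CLAIM (what is proved, stated in full; the proofs are below) =====
def Claim_equal_parse_command_message : Prop := ∀ (message : String), Dom_parse_command_message message → Spec_parse_command_message message (parse_command_message message)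

-- ===== LEMMAS AND PROOFS =====

lemma pv_singleton_prefix (c : Char) (l : List Char) : [c] <+: l ↔ l.head? = some c := by
  cases l with
  | nil => simp
  | cons a t => simp [List.cons_prefix_cons, eq_comm]

lemma pv_find_singleton (cs : List Char) (k : ℕ) (hk : cs[k]? = some '=')
    (hmin : ∀ j < k, cs[j]? ≠ some '=') : PySem.Chars.find cs ['='] = (k : Int) := by
  have hdk : (['='] : List Char) <+: cs.drop k :=
    (pv_singleton_prefix _ _).mpr (by rw [List.head?_drop]; exact hk)
  have hin : PySem.Chars.isIn ['='] cs = true :=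
    (PySem.Chars.exists_prefix_drop_iff_isIn _ _).mp ⟨k, hdk⟩
  have hpos : 0 ≤ PySem.Chars.find cs ['='] :=
    (PySem.Chars.find_nonneg_iff _ _).mpr ((PySem.Chars.isIn_iff_infix _ _).mp hin)
  obtain ⟨hpre, hm⟩ := PySem.Chars.find_spec hpos
  have hn : cs[(PySem.Chars.find cs ['=']).toNat]? = some '=' := by
    rw [← List.head?_drop]; exact (pv_singleton_prefix _ _).mp hpre
  have h1 : ¬ (PySem.Chars.find cs ['=']).toNat < k := fun h => hmin _ h hn
  have h2 : ¬ k < (PySem.Chars.find cs ['=']).toNat := fun h => hm k h hdk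
  omega

lemma pv_find_eq_of_prefix (cs pre : List Char) (h : pre ++ ['='] <+: cs) (hne : '=' ∉ pre) :
    PySem.Chars.find cs ['='] = (pre.length : Int) := by
  obtain ⟨t, ht⟩ := h
  apply pv_find_singleton
  · rw [← ht]; simp
  · intro j hj
    rw [← ht, List.append_assoc, List.getElem?_append_left (by omega)]
    intro hc
    obtain ⟨hlt, hget⟩ := List.getElem?_eq_some_iff.mp hc
    exact hne (hget ▸ List.getElem_mem hlt)

lemma pv_take_find_prefix (cs : List Char) (h : 0 ≤ PySem.Chars.find cs ['=']) :
    cs.take (PySem.Chars.find cs ['=']).toNat ++ ['='] <+: cs := by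
  obtain ⟨hpre, -⟩ := PySem.Chars.find_spec h
  have hn : cs[(PySem.Chars.find cs ['=']).toNat]? = some '=' := by
    rw [← List.head?_drop]; exact (pv_singleton_prefix _ _).mp hpre
  have hlt : (PySem.Chars.find cs ['=']).toNat < cs.length := by
    have := List.getElem?_eq_some_iff.mp hn; exact this.1
  have hdrop : cs.drop (PySem.Chars.find cs ['=']).toNat
      = '=' :: cs.drop ((PySem.Chars.find cs ['=']).toNat + 1) := by
    rw [List.drop_eq_getElem_cons hlt]
    have := List.getElem?_eq_some_iff.mp hn
    simp [this.2]
  exact ⟨cs.drop ((PySem.Chars.find cs ['=']).toNat + 1), by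
    conv_rhs => rw [← List.take_append_drop (PySem.Chars.find cs ['=']).toNat cs, hdrop]
    simp⟩

-- the heart of the equivalence: one loop step of B tracks one loop step of A at keys "ip"/"cmd"
lemma pv_step (p : String) (d : PySem.Dict String String) :
    ((pvBStep d p).get? "ip", (pvBStep d p).get? "cmd") = pvAStep (d.get? "ip", d.get? "cmd") p := by
  by_cases hip : PySem.Str.startswith p "ip=" = true
  · have hpre : (['i','p'] : List Char) ++ ['='] <+: p.toList := by
      have h := (PySem.Chars.startswith_iff _ _).mp (by rw [← PySem.Str.startswith_eq]; exact hip)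
      simpa using h
    have hfS : PySem.Str.find p "=" = 2 := by
      rw [PySem.Str.find_eq]
      have := pv_find_eq_of_prefix p.toList ['i','p'] hpre (by decide)
      simpa using this
    have hkey : PySem.Str.slice p none (some (2 : Int)) = "ip" := by
      apply String.toList_inj.mp
      rw [PySem.Str.toList_slice, PySem.Chars.slice_eq_listSlice,
        show (2 : Int) = ((2 : ℕ) : Int) from rfl, PySem.List.slice_to_natCast]
      obtain ⟨t, ht⟩ := hpre
      rw [← ht]; rfl
    simp only [pvBStep, pvAStep, hfS, hip, if_true]
    norm_num
    constructor
    · rw [hkey, PySem.Dict.get?_insert_self]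
    · rw [hkey, PySem.Dict.get?_insert_of_ne _ _ (by decide : ("cmd" : String) ≠ "ip")]
  · by_cases hcmd : PySem.Str.startswith p "cmd=" = true
    · have hpre : (['c','m','d'] : List Char) ++ ['='] <+: p.toList := by
        have h := (PySem.Chars.startswith_iff _ _).mp (by rw [← PySem.Str.startswith_eq]; exact hcmd)
        simpa using h
      have hfS : PySem.Str.find p "=" = 3 := by
        rw [PySem.Str.find_eq]
        have := pv_find_eq_of_prefix p.toList ['c','m','d'] hpre (by decide)
        simpa using this
      have hkey : PySem.Str.slice p none (some (3 : Int)) = "cmd" := by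
        apply String.toList_inj.mp
        rw [PySem.Str.toList_slice, PySem.Chars.slice_eq_listSlice,
          show (3 : Int) = ((3 : ℕ) : Int) from rfl, PySem.List.slice_to_natCast]
        obtain ⟨t, ht⟩ := hpre
        rw [← ht]; rfl
      simp only [pvBStep, pvAStep, hfS, hip, hcmd, if_true]
      norm_num
      constructor
      · rw [hkey, PySem.Dict.get?_insert_of_ne _ _ (by decide : ("ip" : String) ≠ "cmd")]
      · rw [hkey, PySem.Dict.get?_insert_self]
    · by_cases hEq : PySem.Str.find p "=" = -1
      · have hipf : PySem.Chars.startswith p.toList ['i','p','='] = false := by simpa using hip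
        have hcmdf : PySem.Chars.startswith p.toList ['c','m','d','='] = false := by simpa using hcmd
        have hEqC : PySem.Chars.find p.toList ['='] = -1 := by simpa using hEq
        simp [pvBStep, pvAStep, hipf, hcmdf, hEqC]
      · have hpos : 0 ≤ PySem.Chars.find p.toList ['='] := by
          have h1 : -1 ≤ PySem.Chars.find p.toList ['='] := PySem.Chars.neg_one_le_find _ _
          have h2 : PySem.Chars.find p.toList ['='] ≠ -1 := by
            intro h; apply hEq; rw [PySem.Str.find_eq]; simpa using h
          omega
        have hkpre := pv_take_find_prefix p.toList hpos
        have hfS : PySem.Str.find p "="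
            = ((PySem.Chars.find p.toList ['=']).toNat : Int) := by
          rw [PySem.Str.find_eq]
          simp [Int.toNat_of_nonneg hpos]
        have hkeyL : (PySem.Str.slice p none (some (PySem.Str.find p "="))).toList
            = p.toList.take (PySem.Chars.find p.toList ['=']).toNat := by
          rw [PySem.Str.toList_slice, hfS, PySem.Chars.slice_eq_listSlice,
            PySem.List.slice_to_natCast]
        have hkip : PySem.Str.slice p none (some (PySem.Str.find p "=")) ≠ "ip" := by
          intro h
          apply hip
          rw [PySem.Str.startswith_eq]
          apply (PySem.Chars.startswith_iff _ _).mpr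
          have : p.toList.take (PySem.Chars.find p.toList ['=']).toNat = ['i','p'] := by
            rw [← hkeyL, h]; rfl
          rw [this] at hkpre
          simpa using hkpre
        have hkcmd : PySem.Str.slice p none (some (PySem.Str.find p "=")) ≠ "cmd" := by
          intro h
          apply hcmd
          rw [PySem.Str.startswith_eq]
          apply (PySem.Chars.startswith_iff _ _).mpr
          have : p.toList.take (PySem.Chars.find p.toList ['=']).toNat = ['c','m','d'] := by
            rw [← hkeyL, h]; rfl
          rw [this] at hkpre
          simpa using hkpre
        have hipf : PySem.Str.startswith p "ip=" = false := by simpa using hip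
        have hcmdf : PySem.Str.startswith p "cmd=" = false := by simpa using hcmd
        simp only [pvBStep, pvAStep, hipf, hcmdf, Bool.false_eq_true, if_false]
        rw [if_pos (by simpa using hEq)]
        rw [PySem.Dict.get?_insert_of_ne _ _ (Ne.symm hkip),
          PySem.Dict.get?_insert_of_ne _ _ (Ne.symm hkcmd)]

lemma pv_fold_inv (parts : List String) (st : Option String × Option String)
    (d : PySem.Dict String String)
    (h1 : st.1 = d.get? "ip") (h2 : st.2 = d.get? "cmd") :
    parts.foldl pvAStep st
      = ((parts.foldl pvBStep d).get? "ip", (parts.foldl pvBStep d).get? "cmd") := by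
  induction parts generalizing st d with
  | nil => simp only [List.foldl_nil]; rw [← h1, ← h2]
  | cons p rest ih =>
    simp only [List.foldl_cons]
    apply ih
    · have := pv_step p d
      rw [← h1, ← h2] at this
      exact (congrArg Prod.fst this).symm
    · have := pv_step p d
      rw [← h1, ← h2] at this
      exact (congrArg Prod.snd this).symm

-- ===== VERDICT (by name: the statement is the Claim_ definition above) =====
theorem parse_command_message_spec : Claim_equal_parse_command_message := by
  intro message _
  unfold Spec_parse_command_message parse_command_message parse_command_message_alt
  exact pv_fold_inv _ _ PySem.Dict.empty (by simp) (by simp)
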